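-- pv_equiv track=rewrite | github.com/Chowlett2/programming_challenges | tallest_skyscraped.py | tallest_skyscraper
-- ===== SOURCE A (Python) =====
-- def tallest_skyscraper(lst):
--     lstLen = len(lst)
--     col1 = col2 = col3 = col4 = 0
--     index1 = 0
--     index2 = 0
--     while index2 < 4:
--         while index1 < lstLen:
--             col1 += lst[index1][index2]
--             index1 += 1
--         index2 += 1
--         index1 = 0
--         while index1 < lstLen:
--             col2 += lst[index1][index2]
--             index1 += 1
--         index2 += 1
--         index1 = 0
--         while index1 < lstLen:
--             col3 += lst[index1][index2]
--             index1 += 1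
--         index2 += 1
--         index1 = 0
--         while index1 < lstLen:
--             col4 += lst[index1][index2]
--             index1 += 1
--         index2 += 1
--     return max(col1, col2, col3, col4)
-- ===== SOURCE B (Python) =====
-- def tallest_skyscraper(lst):
--     a = b = c = d = 0
--     for row in lst:
--         a += row[0]
--         b += row[1]
--         c += row[2]
--         d += row[3]
--     return max(a, b, c, d)
-- ===== Notes on version B (the rewrite author's own statement) =====
-- stated objective: simpler
-- what changed: Replaces A's four separate index-driven column-major while-loop scans with one row-major pass maintaining four accumulators.
import Mathlib
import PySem

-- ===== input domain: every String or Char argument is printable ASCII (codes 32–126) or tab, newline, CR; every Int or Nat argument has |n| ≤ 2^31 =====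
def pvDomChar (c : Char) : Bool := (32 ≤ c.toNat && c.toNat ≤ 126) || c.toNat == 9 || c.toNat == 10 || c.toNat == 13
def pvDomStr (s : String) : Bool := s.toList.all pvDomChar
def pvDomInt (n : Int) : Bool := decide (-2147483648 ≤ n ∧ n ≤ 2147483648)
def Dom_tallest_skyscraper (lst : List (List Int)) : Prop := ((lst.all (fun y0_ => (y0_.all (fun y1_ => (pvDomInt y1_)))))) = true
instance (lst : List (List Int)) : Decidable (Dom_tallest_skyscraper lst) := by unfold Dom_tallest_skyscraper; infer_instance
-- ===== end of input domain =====

-- B replaces A's four index-driven column-major scans with one row-major pass over four accumulators (objective: simpler).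

-- ===== PORT A =====
-- A's inner 'while index1 < lstLen: col += lst[index1][index2]' loops, one per column.
-- lst[index1][index2] is exact as List.getD under Pre_ (index1 < len, index2 < 4 ≤ row length);
-- rows shorter than 4 make Python raise IndexError and are excluded by Pre_.
def pvColLoop (lst : List (List Int)) (j : Nat) (acc : Int) : Int :=
  (List.range lst.length).foldl (fun c i => c + ((lst.getD i []).getD j 0)) acc

def tallest_skyscraper (lst : List (List Int)) : Int :=
  let col1 := pvColLoop lst 0 0
  let col2 := pvColLoop lst 1 0
  let col3 := pvColLoop lst 2 0
  let col4 := pvColLoop lst 3 0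
  max (max (max col1 col2) col3) col4

-- ===== PORT B =====
-- one pass: fold over the rows with a 4-tuple of accumulators (row[j] exact as getD under Pre_)
def tallest_skyscraper_alt (lst : List (List Int)) : Int :=
  let s := lst.foldl
    (fun (s : Int × Int × Int × Int) row =>
      (s.1 + row.getD 0 0, s.2.1 + row.getD 1 0, s.2.2.1 + row.getD 2 0, s.2.2.2 + row.getD 3 0))
    (0, 0, 0, 0)
  max (max (max s.1 s.2.1) s.2.2.1) s.2.2.2

-- ===== PRECONDITION & SPEC =====
-- Pre_ excludes exactly the inputs where Python A raises IndexError: some row has fewer than 4 entries.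
def Pre_tallest_skyscraper (lst : List (List Int)) : Prop :=
  ∀ row ∈ lst, 4 ≤ row.length
instance (lst : List (List Int)) : Decidable (Pre_tallest_skyscraper lst) := by
  unfold Pre_tallest_skyscraper; infer_instance

def pvWitness_tallest_skyscraper : List (List Int) := [[3, 1, 4, 1], [5, 9, 2, 6]]

def Spec_tallest_skyscraper (lst : List (List Int)) (out : Int) : Prop := out = tallest_skyscraper_alt lst
instance (lst : List (List Int)) (out : Int) : Decidable (Spec_tallest_skyscraper lst out) := by unfold Spec_tallest_skyscraper; infer_instance

-- ===== CLAIM (what is proved, stated in full; the proofs are below) =====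
def Claim_equal_tallest_skyscraper : Prop := ∀ (lst : List (List Int)), Dom_tallest_skyscraper lst → Pre_tallest_skyscraper lst → Spec_tallest_skyscraper lst (tallest_skyscraper lst)

-- ===== LEMMAS AND PROOFS =====

-- A's index-driven column scan equals a row-wise fold of the same column.
theorem pvColLoop_eq (j : Nat) :
    ∀ (lst : List (List Int)) (acc : Int),
      pvColLoop lst j acc = lst.foldl (fun c row => c + row.getD j 0) acc := by
  intro lst
  induction lst with
  | nil => intro acc; rfl
  | cons x xs ih =>
    intro acc
    simp only [pvColLoop, List.length_cons, List.range_succ_eq_map, List.foldl_cons,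
      List.foldl_map, List.getD_cons_zero, List.getD_cons_succ] at *
    exact ih (acc + x.getD j 0)

-- B's 4-tuple fold splits into four independent scalar folds.
theorem pvPairFold (lst : List (List Int)) :
    ∀ (a b c d : Int),
      lst.foldl
        (fun (s : Int × Int × Int × Int) row =>
          (s.1 + row.getD 0 0, s.2.1 + row.getD 1 0, s.2.2.1 + row.getD 2 0, s.2.2.2 + row.getD 3 0))
        (a, b, c, d)
      = (lst.foldl (fun c row => c + row.getD 0 0) a,
         lst.foldl (fun c row => c + row.getD 1 0) b,
         lst.foldl (fun c row => c + row.getD 2 0) c,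
         lst.foldl (fun c row => c + row.getD 3 0) d) := by
  induction lst with
  | nil => intro a b c d; rfl
  | cons x xs ih =>
    intro a b c d
    simpa using ih (a + x.getD 0 0) (b + x.getD 1 0) (c + x.getD 2 0) (d + x.getD 3 0)

-- ===== VERDICT (by name: the statement is the Claim_ definition above) =====
theorem tallest_skyscraper_spec : Claim_equal_tallest_skyscraper := by
  intro lst _ _
  unfold Spec_tallest_skyscraper tallest_skyscraper tallest_skyscraper_alt
  simp only [pvColLoop_eq, pvPairFold]
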